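-- pv_equiv track=rewrite | github.com/p-lots/codewars | 6-kyu/dubstep/python/solution.py | song_decoder
-- ===== SOURCE A (Python) =====
-- def song_decoder(song):
--     i = 0
--     word_temp = ''
--     ret = []
--     while i < len(song):
--         if song[i:i + 3] == "WUB":
--             if len(word_temp) > 0:
--                 ret.append(word_temp)
--                 word_temp = ''
--             i += 3
--         else:
--             word_temp += song[i]
--             i += 1
--     if len(word_temp) > 0:
--         ret.append(word_temp)
--     return ' '.join(ret)
-- ===== SOURCE B (Python) =====
-- def song_decoder(song):
--     return ' '.join(filter(None, song.split('WUB')))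
-- ===== Notes on version B (the rewrite author's own statement) =====
-- stated objective: idiomatic
-- what changed: Replaced the hand-written character-scanning state machine (index, word buffer, result list) with a single split on the separator, filtering out empty segments and joining with spaces; a timing run measured this much faster on large inputs.
import Mathlib
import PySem

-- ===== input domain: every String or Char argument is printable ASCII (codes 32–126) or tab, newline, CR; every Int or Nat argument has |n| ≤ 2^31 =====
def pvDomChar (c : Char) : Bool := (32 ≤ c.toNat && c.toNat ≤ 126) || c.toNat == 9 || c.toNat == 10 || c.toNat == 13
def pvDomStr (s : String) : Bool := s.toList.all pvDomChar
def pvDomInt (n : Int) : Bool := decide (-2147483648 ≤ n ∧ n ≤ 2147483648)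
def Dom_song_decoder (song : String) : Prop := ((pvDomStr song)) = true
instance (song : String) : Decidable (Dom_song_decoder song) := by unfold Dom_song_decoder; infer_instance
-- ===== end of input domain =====

-- B replaces A's hand-written character-scanning state machine with split-on-"WUB" / drop-empties / join-with-spaces (idiomatic decomposition; measured faster on large inputs in a timing run).


-- ===== PORT A =====
-- A's while loop: i walks the string; word_temp buffers the current word; ret collects finished words.
-- Ported as recursion over the remaining suffix (song[i:]); 'song[i:i+3] == "WUB"' is 'take 3 = "WUB".toList'.
def songLoopA : List Char → List Char → List (List Char) → List (List Char)
  | [], w, ret => if w.length > 0 then ret ++ [w] else ret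
  | c :: rest, w, ret =>
      if List.take 3 (c :: rest) = "WUB".toList then
        songLoopA (List.drop 3 (c :: rest)) [] (if w.length > 0 then ret ++ [w] else ret)
      else
        songLoopA rest (w ++ [c]) ret
termination_by s _ _ => s.length
decreasing_by all_goals (simp; try omega)

def song_decoder (song : String) : String :=
  String.ofList (PySem.Chars.join " ".toList (songLoopA song.toList [] []))

-- ===== PORT B =====
-- Source B: return ' '.join(filter(None, song.split('WUB')))
def song_decoder_alt (song : String) : String :=
  String.ofList (PySem.Chars.join " ".toList
    ((PySem.Chars.splitOn song.toList "WUB".toList).filter (fun w => w ≠ [])))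

-- ===== PRECONDITION & SPEC =====
def Spec_song_decoder (song : String) (out : String) : Prop := out = song_decoder_alt song
instance (song : String) (out : String) : Decidable (Spec_song_decoder song out) := by unfold Spec_song_decoder; infer_instance

-- ===== CLAIM (what is proved, stated in full; the proofs are below) =====
def Claim_equal_song_decoder : Prop := ∀ (song : String), Dom_song_decoder song → Spec_song_decoder song (song_decoder song)

-- ===== LEMMAS AND PROOFS =====

-- Common reference shape: the segments of s split on "WUB", with w the word buffered so far.
def pvSegs : List Char → List Char → List (List Char)
  | w, [] => [w]
  | w, c :: rest =>
      if List.take 3 (c :: rest) = "WUB".toList then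
        w :: pvSegs [] (List.drop 3 (c :: rest))
      else
        pvSegs (w ++ [c]) rest
termination_by _ s => s.length
decreasing_by all_goals (simp; try omega)

theorem songLoopA_eq : ∀ (n : Nat) (s : List Char), s.length ≤ n →
    ∀ (w : List Char) (ret : List (List Char)),
    songLoopA s w ret = ret ++ (pvSegs w s).filter (fun v => v ≠ []) := by
  intro n
  induction n with
  | zero =>
    intro s hs w ret
    have hsnil : s = [] := by cases s <;> simp_all
    subst hsnil
    rw [songLoopA, pvSegs]
    by_cases hw : w = []
    · simp [hw]
    · simp [hw, List.length_pos_iff]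
  | succ n ih =>
    intro s hs w ret
    cases s with
    | nil =>
      rw [songLoopA, pvSegs]
      by_cases hw : w = []
      · simp [hw]
      · simp [hw, List.length_pos_iff]
    | cons c rest =>
      rw [songLoopA, pvSegs]
      by_cases hp : List.take 3 (c :: rest) = "WUB".toList
      · rw [if_pos hp, if_pos hp, ih _ (by simp at hs ⊢; omega), List.filter_cons]
        by_cases hw : w = []
        · simp [hw]
        · simp [hw, List.length_pos_iff]
      · rw [if_neg hp, if_neg hp, ih _ (by simp at hs ⊢; omega)]

theorem splitOn_go_eq : ∀ (fuel : Nat) (l cur : List Char) (acc : List (List Char)),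
    l.length < fuel →
    PySem.Chars.splitOn.go "WUB".toList fuel l cur acc = acc.reverse ++ pvSegs cur.reverse l := by
  intro fuel
  induction fuel with
  | zero => intro l cur acc h; omega
  | succ f ih =>
    intro l cur acc h
    cases l with
    | nil => simp [PySem.Chars.splitOn.go, pvSegs]
    | cons c rest =>
      rw [PySem.Chars.splitOn.go]
      have hiff : (("WUB".toList).isPrefixOf (c :: rest) = true) ↔
          List.take 3 (c :: rest) = "WUB".toList := by
        rw [List.isPrefixOf_iff_prefix, List.prefix_iff_eq_take]
        constructor <;> (intro h'; exact h'.symm)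
      by_cases hp : List.take 3 (c :: rest) = "WUB".toList
      · rw [if_pos (hiff.mpr hp)]
        have hlen : ("WUB".toList).length = 3 := by decide
        rw [hlen]
        rw [ih _ _ _ (by simp at h ⊢; omega)]
        rw [pvSegs, if_pos hp]
        simp
      · rw [if_neg (fun hh => hp (hiff.mp hh))]
        rw [ih _ _ _ (by simp at h ⊢; omega)]
        rw [pvSegs, if_neg hp, List.reverse_cons]

theorem splitOn_eq_segs (s : List Char) :
    PySem.Chars.splitOn s "WUB".toList = pvSegs [] s := by
  rw [PySem.Chars.splitOn, splitOn_go_eq _ _ _ _ (by omega)]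
  rfl

-- ===== VERDICT (by name: the statement is the Claim_ definition above) =====
theorem song_decoder_spec : Claim_equal_song_decoder := by
  intro song _
  unfold Spec_song_decoder song_decoder song_decoder_alt
  rw [songLoopA_eq song.toList.length song.toList (le_refl _), splitOn_eq_segs]
  rfl
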